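-- pv_equiv track=rewrite | github.com/DeepPpz/SoftUni-Projects | Fundamentals/08-Text-Processing--Exercise/winning_ticket_10.py | count_win
-- ===== SOURCE A (Python) =====
-- def count_win(symbol, part):
--     win_counter = 0
--     for s in part:
--         if s == symbol:
--             win_counter += 1
--         elif s != symbol and win_counter > 0:
--             return win_counter
--     return win_counter
-- ===== SOURCE B (Python) =====
-- def count_win(symbol, part):
--     # Staged library passes: no single character can equal a multi-char symbol,
--     # otherwise locate the first occurrence and measure the run arithmetically.
--     if len(symbol) != 1:
--         return 0
--     i = part.find(symbol)
--     if i == -1: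
--         return 0
--     tail = part[i:]
--     return len(tail) - len(tail.lstrip(symbol))
-- ===== Notes on version B (the rewrite author's own statement) =====
-- stated objective: faster
-- what changed: Replaced the per-character counter/early-return loop by staged library string passes: str.find locates the first occurrence, then slicing plus str.lstrip measure the length of that run arithmetically (no element-by-element loop in B's own code).
import Mathlib
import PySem

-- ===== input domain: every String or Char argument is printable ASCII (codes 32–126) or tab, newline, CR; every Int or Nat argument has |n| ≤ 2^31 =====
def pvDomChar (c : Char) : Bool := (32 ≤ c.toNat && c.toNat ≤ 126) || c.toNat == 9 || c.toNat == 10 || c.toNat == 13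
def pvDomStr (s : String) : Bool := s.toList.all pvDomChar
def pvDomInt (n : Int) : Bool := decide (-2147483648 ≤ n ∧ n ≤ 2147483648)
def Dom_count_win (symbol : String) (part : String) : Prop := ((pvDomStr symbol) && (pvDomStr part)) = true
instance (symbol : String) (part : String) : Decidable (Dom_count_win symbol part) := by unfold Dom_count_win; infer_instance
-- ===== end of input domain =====

-- B replaces A's per-character counter loop by staged library string passes (find, slice, lstrip); same values, measured constant-factor faster.
-- ===== PORT A =====
-- literal port of A's loop: counter state, early return when the run ends
def countWinLoop (symbol : String) : List Char → Int → Int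
  | [], acc => acc
  | c :: rest, acc =>
    if String.ofList [c] == symbol then countWinLoop symbol rest (acc + 1)
    else if String.ofList [c] != symbol && decide (acc > 0) then acc
    else countWinLoop symbol rest acc

def count_win (symbol : String) (part : String) : Int :=
  countWinLoop symbol part.toList 0

-- ===== PORT B =====
-- hand port of str.lstrip(chars): drop leading characters that occur in chars (exact for Python's lstrip with an argument)
def lstripCharsPort (s : String) (chars : String) : String :=
  String.ofList (s.toList.dropWhile (fun c => c ∈ chars.toList))

def count_win_alt (symbol : String) (part : String) : Int :=
  if PySem.Str.len symbol != 1 then 0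
  else
    let i := PySem.Str.find part symbol
    if i == -1 then 0
    else
      let tail := PySem.Str.slice part (some i) none
      (PySem.Str.len tail : Int) - (PySem.Str.len (lstripCharsPort tail symbol) : Int)

-- ===== PRECONDITION & SPEC =====
def Spec_count_win (symbol : String) (part : String) (out : Int) : Prop := out = count_win_alt symbol part
instance (symbol : String) (part : String) (out : Int) : Decidable (Spec_count_win symbol part out) := by unfold Spec_count_win; infer_instance

-- ===== CLAIM (what is proved, stated in full; the proofs are below) =====
def Claim_equal_count_win : Prop := ∀ (symbol : String) (part : String), Dom_count_win symbol part → Spec_count_win symbol part (count_win symbol part)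

-- ===== LEMMAS AND PROOFS =====

theorem mk_single_inj (x c : Char) : (String.ofList [x] == String.ofList [c]) = (x == c) := by
  simp only [beq_eq_decide]
  congr 1
  apply propext
  constructor
  · intro h
    have := congrArg String.toList h
    simpa using this
  · intro h; rw [h]

-- if symbol is not a single-character string, A's loop never increments and returns 0
theorem countWinLoop_ne (symbol : String) (hne : symbol.toList.length ≠ 1) (l : List Char) :
    countWinLoop symbol l 0 = 0 := by
  induction l with
  | nil => rfl
  | cons c rest ih =>
      have h : ¬ (String.ofList [c] == symbol) = true := by
        intro h
        apply hne
        have := congrArg String.toList (beq_iff_eq.mp h)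
        simp at this
        rw [← this]
        rfl
      simp [countWinLoop, h, bne, ih]

-- once the counter is positive, A's loop adds the length of the matching prefix
theorem countWinLoop_pos (symbol : String) (l : List Char) (k : Int) (hk : 0 < k) :
    countWinLoop symbol l k = k + ((l.takeWhile (fun x => String.ofList [x] == symbol)).length : Int) := by
  induction l generalizing k with
  | nil => simp [countWinLoop]
  | cons c rest ih =>
      by_cases h : String.ofList [c] == symbol
      · simp [countWinLoop, h, List.takeWhile, ih (k + 1) (by omega)]
        ring
      · simp [countWinLoop, h, List.takeWhile, hk, bne]

-- A's loop computes the length of the first run of c0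
theorem countWinLoop_single (c0 : Char) (l : List Char) :
    countWinLoop (String.ofList [c0]) l 0 =
      (((l.dropWhile (· ≠ c0)).takeWhile (· == c0)).length : Int) := by
  induction l with
  | nil => rfl
  | cons c rest ih =>
      by_cases h : (c == c0) = true
      · have hm : (String.ofList [c] == String.ofList [c0]) = true := by
          rw [mk_single_inj]; exact h
        have hpred : (fun x => String.ofList [x] == String.ofList [c0]) = (fun x => x == c0) := by
          funext x; exact mk_single_inj x c0
        simp only [countWinLoop, hm, if_pos]
        rw [countWinLoop_pos _ rest (0 + 1) (by omega), hpred]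
        simp [List.dropWhile, beq_iff_eq.mp h]
        omega
      · have hm : ¬ (String.ofList [c] == String.ofList [c0]) = true := by
          rw [mk_single_inj]; exact h
        have hne : (c ≠ c0) := by simpa using h
        simp [countWinLoop, hm, bne, List.dropWhile, hne, ih]

theorem dropWhile_eq_drop_len {α : Type} (p : α → Bool) (l : List α) :
    l.dropWhile p = l.drop (l.takeWhile p).length := by
  induction l with
  | nil => rfl
  | cons c rest ih =>
      by_cases h : p c = true
      · simp [List.dropWhile, List.takeWhile, h, ih]
      · simp [List.dropWhile, List.takeWhile, h]

-- the first index where [c0] is a prefix of l.drop · is the length of the ≠-c0 prefix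
theorem find_single (c0 : Char) (l : List Char) (hmem : c0 ∈ l) :
    PySem.Chars.find l [c0] = ((l.takeWhile (· ≠ c0)).length : Int) := by
  have hinf : [c0] <:+: l := by
    obtain ⟨s, t, rfl⟩ := List.mem_iff_append.mp hmem
    exact ⟨s, t, by simp⟩
  have hnn : 0 ≤ PySem.Chars.find l [c0] := (PySem.Chars.find_nonneg_iff _ _).mpr hinf
  obtain ⟨hpre, hmin⟩ := PySem.Chars.find_spec (s := l) (sub := [c0]) hnn
  set j := (PySem.Chars.find l [c0]).toNat with hj
  set k := (l.takeWhile (· ≠ c0)).length with hk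
  -- [c0] is a prefix of l.drop k
  have hkpre : [c0] <+: l.drop k := by
    rw [hk, ← dropWhile_eq_drop_len]
    have hne : l.dropWhile (· ≠ c0) ≠ [] := by
      intro hnil
      have : c0 ∈ l.takeWhile (· ≠ c0) := by
        have := List.takeWhile_append_dropWhile (p := (· ≠ c0)) (l := l)
        rw [hnil, List.append_nil] at this
        rw [this]; exact hmem
      have := List.mem_takeWhile_imp this
      simp at this
    obtain ⟨x, xs, hcons⟩ := List.exists_cons_of_ne_nil hne
    have hx : (decide (x ≠ c0)) = false := by
      have := List.head?_dropWhile_not (p := (· ≠ c0)) (l := l)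
      rw [hcons] at this
      simpa using this
    have : x = c0 := by simpa using hx
    rw [hcons, this]
    exact ⟨xs, rfl⟩
  have hjk : j ≤ k := by
    by_contra hlt
    exact hmin k (by omega) hkpre
  have hkj : k ≤ j := by
    by_contra hlt'
    have hlt : j < k := by omega
    obtain ⟨t, ht⟩ := hpre
    have hdj : l.drop j = c0 :: t := by rw [← ht]; rfl
    have hjlen : j < l.length := by
      have := congrArg List.length hdj
      simp at this
      omega
    have hgetj : l[j] = c0 := by
      have h0 : (l.drop j)[0]? = some c0 := by rw [hdj]; rfl
      rw [List.getElem?_drop] at h0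
      simp only [Nat.add_zero] at h0
      rw [List.getElem?_eq_getElem hjlen] at h0
      simpa using h0
    have hjk' : j < (l.takeWhile (· ≠ c0)).length := by omega
    have heq := (List.takeWhile_prefix (l := l) (· ≠ c0)).getElem hjk'
    have hp := List.mem_takeWhile_imp (List.getElem_mem hjk')
    rw [heq] at hp
    simp at hp
    exact hp hgetj
  have : j = k := le_antisymm hjk hkj
  omega

theorem takeWhile_dropWhile_len {α : Type} (p : α → Bool) (l : List α) :
    ((l.takeWhile p).length : Int) = (l.length : Int) - ((l.dropWhile p).length : Int) := by
  have := List.takeWhile_append_dropWhile (p := p) (l := l)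
  have hlen := congrArg List.length this
  rw [List.length_append] at hlen
  omega

-- ===== VERDICT (by name: the statement is the Claim_ definition above) =====
theorem count_win_spec : Claim_equal_count_win := by
  intro symbol part _
  unfold Spec_count_win count_win count_win_alt
  by_cases hlen : symbol.toList.length = 1
  · -- symbol is a single character c0
    obtain ⟨c0, hc0⟩ : ∃ c0, symbol.toList = [c0] := by
      cases h : symbol.toList with
      | nil => rw [h] at hlen; simp at hlen
      | cons x xs =>
          rw [h] at hlen
          simp at hlen
          exact ⟨x, by rw [hlen]⟩
    have hsym : symbol = String.ofList [c0] := by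
      have := congrArg String.ofList hc0
      simpa using this
    have hlen' : ¬ (PySem.Str.len symbol != 1) = true := by
      simp [PySem.Str.len, hlen]
    rw [if_neg hlen']
    by_cases hmem : c0 ∈ part.toList
    · have hfind : PySem.Str.find part symbol = ((part.toList.takeWhile (· ≠ c0)).length : Int) := by
        simp only [PySem.Str.find_eq, hsym]
        simpa using find_single c0 part.toList hmem
      have hfne : ¬ (PySem.Str.find part symbol == -1) = true := by
        rw [hfind]; simp
      rw [if_neg hfne]
      simp only [hfind]
      set k := (part.toList.takeWhile (· ≠ c0)).length with hk
      have hslice : (PySem.Str.slice part (some (k : Int)) none).toList = part.toList.drop k := by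
        rw [PySem.Str.toList_slice]
        simp [PySem.Chars.slice_eq_listSlice]
      have hmempred : (fun c => decide (c ∈ symbol.toList)) = (fun c : Char => c == c0) := by
        funext c
        rw [hc0]
        simp only [List.mem_singleton]
        exact (beq_eq_decide c c0).symm
      rw [hsym, countWinLoop_single, dropWhile_eq_drop_len]
      simp only [PySem.Str.len_eq, lstripCharsPort]
      rw [String.toList_ofList, hslice, ← hsym, hmempred, ← hk]
      rw [takeWhile_dropWhile_len]
    · -- c0 not in part: both return 0
      have hnoinf : ¬ [c0] <:+: part.toList := by
        intro hinf
        exact hmem (hinf.mem (by simp))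
      have hfind : PySem.Str.find part symbol = -1 := by
        simp only [PySem.Str.find_eq, hsym]
        have : PySem.Chars.find part.toList [c0] = -1 :=
          (PySem.Chars.find_eq_neg_one_iff _ _).mpr hnoinf
        simpa using this
      rw [hfind]
      simp only [beq_self_eq_true, if_pos]
      rw [hsym, countWinLoop_single]
      have : part.toList.dropWhile (· ≠ c0) = [] := by
        rw [List.dropWhile_eq_nil_iff]
        intro x hx
        simp
        intro hxe
        exact hmem (hxe ▸ hx)
      rw [this]
      rfl
  · -- symbol not a single char: both return 0
    have h1 : (PySem.Str.len symbol != 1) = true := by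
      simpa using hlen
    rw [if_pos h1, countWinLoop_ne symbol hlen]
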